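-- pv_equiv track=rewrite | github.com/srac1777/learnPython | CtCI-Python/1p3.py | urlify_in_place
-- ===== SOURCE A (Python) =====
-- def urlify_in_place(arr, true_len):
-- 	true_len_rem = true_len
-- 	count = 0
--
-- 	while true_len_rem > 0:
-- 		if arr[count] != " ":
-- 			true_len_rem -= 1
-- 			count += 1
-- 		else:
-- 			arr[count] = '%'
-- 			true_len_rem -= 1
-- 			count, arr = shift_by_two(arr, count, true_len_rem)
-- 	return arr
--
-- def shift_by_two(arr, count, true_len_rem):
-- 	end_pos = count + true_len_rem
-- 	start_pos = count + 1
--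
-- 	for i in range(end_pos, start_pos - 1, -1):
-- 		arr[i+2] = arr[i]
--
-- 	arr[start_pos] = '2'
-- 	arr[start_pos + 1] = '0'
-- 	return count + 3, arr
-- ===== SOURCE B (Python) =====
-- def urlify_in_place(arr, true_len):
--     # Jump from space to space with list.index, copying the space-free chunks wholesale
--     # and writing '%','2','0' for each space; then reattach the untouched tail.
--     # (A mutates arr in place; B only computes the return value.)
--     n = true_len if true_len > 0 else 0
--     out = []
--     i = 0
--     while True:
--         try:
--             j = arr.index(" ", i, n)
--         except ValueError:
--             break
--         out += arr[i:j]
--         out += ['%', '2', '0']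
--         i = j + 1
--     out += arr[i:n]
--     return out + arr[len(out):]
-- ===== Notes on version B (the rewrite author's own statement) =====
-- stated objective: alternative
-- what changed: Replace A's in-place per-space shift-by-two of the whole tail by a pass that jumps from space to space with list.index, copying space-free chunks into a fresh output list and reattaching the untouched tail (return value only; A also mutates arr in place).
import Mathlib
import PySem

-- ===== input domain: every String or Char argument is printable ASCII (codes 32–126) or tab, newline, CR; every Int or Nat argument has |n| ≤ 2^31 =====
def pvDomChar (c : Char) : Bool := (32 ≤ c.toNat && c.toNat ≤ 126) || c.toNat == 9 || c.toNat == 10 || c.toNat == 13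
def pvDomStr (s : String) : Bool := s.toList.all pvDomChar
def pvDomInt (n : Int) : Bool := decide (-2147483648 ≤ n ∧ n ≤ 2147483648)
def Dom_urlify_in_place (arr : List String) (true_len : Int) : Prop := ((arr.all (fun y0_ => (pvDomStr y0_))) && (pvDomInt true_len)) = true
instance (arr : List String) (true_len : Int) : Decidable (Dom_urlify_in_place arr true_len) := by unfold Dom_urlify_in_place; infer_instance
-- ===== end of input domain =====

-- B builds the result in a fresh list, jumping from space to space and copying the chunks
-- between them, instead of A's in-place shift-by-two of the tail at every space
-- (the equivalence is about the RETURN value only; A also mutates arr in place).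

-- ===== PORT A =====
-- shift_by_two: for i in range(end_pos, start_pos - 1, -1): arr[i+2] = arr[i]; then write '2','0'
def pvShiftByTwo (arr : List String) (count : Int) (true_len_rem : Int) : Int × List String :=
  (count + 3,
   PySem.List.pySetD
     (PySem.List.pySetD
       ((PySem.List.pyRange (count + true_len_rem) ((count + 1) - 1) (-1)).foldl
          (fun a i => PySem.List.pySetD a (i + 2) (PySem.List.pyGetD a i "")) arr)
       (count + 1) "2")
     ((count + 1) + 1) "0")

-- the while loop of A, recursing on true_len_rem
def pvLoopA (arr : List String) (true_len_rem : Int) (count : Int) : List String :=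
  if h : 0 < true_len_rem then
    if PySem.List.pyGetD arr count "" ≠ " " then
      pvLoopA arr (true_len_rem - 1) (count + 1)
    else
      pvLoopA (pvShiftByTwo (PySem.List.pySetD arr count "%") count (true_len_rem - 1)).2
        (true_len_rem - 1)
        (pvShiftByTwo (PySem.List.pySetD arr count "%") count (true_len_rem - 1)).1
  else arr
termination_by true_len_rem.toNat
decreasing_by all_goals omega

def urlify_in_place (arr : List String) (true_len : Int) : List String :=
  pvLoopA arr true_len 0

-- ===== PORT B =====
-- hand port of list.index(" ", i, n): absolute index of the first " " in arr[i:n]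
-- (exact: Python clamps the stop bound at len(arr); ValueError = none)
def pvFindSpace (arr : List String) (i n : Nat) : Option Nat :=
  if h : i < n ∧ i < arr.length then
    (if arr[i]'h.2 = " " then some i else pvFindSpace arr (i + 1) n)
  else none
termination_by n - i
decreasing_by exact Nat.sub_succ_lt_self n i h.1

theorem pvFindSpace_some (arr : List String) (n : Nat) :
    ∀ i j, pvFindSpace arr i n = some j →
      i ≤ j ∧ j < n ∧ ∃ hj : j < arr.length, arr[j]'hj = " " := by
  intro i
  induction hfuel : n - i using Nat.strong_induction_on generalizing i with
  | _ fuel ih =>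
    intro j hfind
    rw [pvFindSpace] at hfind
    split at hfind
    · rename_i h
      split at hfind
      · rename_i hsp
        cases hfind
        exact ⟨le_refl _, h.1, h.2, hsp⟩
      · have := ih (n - (i + 1)) (by omega) (i + 1) rfl j hfind
        exact ⟨by omega, this.2⟩
    · cases hfind

-- the while loop of B: out grows by a chunk (plus '%','2','0') per space found
def pvLoopB (arr : List String) (n : Nat) (i : Nat) (out : List String) : List String :=
  match h : pvFindSpace arr i n with
  | some j =>
      pvLoopB arr n (j + 1)
        (out ++ PySem.List.slice arr (some (i : Int)) (some (j : Int)) ++ ["%", "2", "0"])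
  | none => out ++ PySem.List.slice arr (some (i : Int)) (some (n : Int))
termination_by n - i
decreasing_by
  obtain ⟨h1, h2, -⟩ := pvFindSpace_some arr n i _ h
  omega

-- the final value of B's `out` variable
def pvAltOut (arr : List String) (true_len : Int) : List String :=
  pvLoopB arr (if 0 < true_len then true_len.toNat else 0) 0 []

def urlify_in_place_alt (arr : List String) (true_len : Int) : List String :=
  pvAltOut arr true_len ++ PySem.List.slice arr (some ((pvAltOut arr true_len).length : Int)) none

-- ===== PRECONDITION & SPEC =====
-- Pre_ excludes exactly the inputs where A raises IndexError: a positive true_len that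
-- exceeds len(arr), or a buffer too short for the expanded string.
def Pre_urlify_in_place (arr : List String) (true_len : Int) : Prop :=
  0 < true_len →
    (true_len ≤ (arr.length : Int) ∧
     true_len + 2 * ((arr.take true_len.toNat).count " " : Int) ≤ (arr.length : Int))
instance (arr : List String) (true_len : Int) : Decidable (Pre_urlify_in_place arr true_len) := by
  unfold Pre_urlify_in_place; infer_instance

def pvWitness_urlify_in_place : List String × Int := (["a", " ", "b", " ", " "], 3)

def Spec_urlify_in_place (arr : List String) (true_len : Int) (out : List String) : Prop := out = urlify_in_place_alt arr true_len
instance (arr : List String) (true_len : Int) (out : List String) : Decidable (Spec_urlify_in_place arr true_len out) := by unfold Spec_urlify_in_place; infer_instance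

-- ===== CLAIM (what is proved, stated in full; the proofs are below) =====
def Claim_equal_urlify_in_place : Prop := ∀ (arr : List String) (true_len : Int), Dom_urlify_in_place arr true_len → Pre_urlify_in_place arr true_len → Spec_urlify_in_place arr true_len (urlify_in_place arr true_len)

-- ===== LEMMAS AND PROOFS =====

-- the per-character expansion B performs
def pvUrlF (c : String) : List String := if c = " " then ["%", "2", "0"] else [c]

theorem pvUrlF_len (m : List String) :
    m.length ≤ (m.flatMap pvUrlF).length := by
  induction m with
  | nil => simp
  | cons c m ih =>
    simp only [List.flatMap_cons, List.length_cons, List.length_append]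
    have : 1 ≤ (pvUrlF c).length := by unfold pvUrlF; split <;> simp
    omega

theorem pvUrlF_len_count (m : List String) :
    (m.flatMap pvUrlF).length = m.length + 2 * m.count " " := by
  induction m with
  | nil => simp
  | cons c m ih =>
    simp only [List.flatMap_cons, List.length_append, List.length_cons, ih, List.count_cons]
    unfold pvUrlF
    by_cases h : c = " " <;> simp [h] <;> omega

theorem pv_slice_cons (arr : List String) (i j : Nat) (hij : i < j) (hil : i < arr.length) :
    PySem.List.slice arr (some (i : Int)) (some (j : Int))
      = arr[i]'hil :: PySem.List.slice arr (some ((i + 1 : Nat) : Int)) (some (j : Int)) := by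
  rw [PySem.List.slice_natCast, PySem.List.slice_natCast, List.drop_eq_getElem_cons hil]
  obtain ⟨k, hk⟩ : ∃ k, j - i = k + 1 := ⟨j - i - 1, by omega⟩
  rw [hk, List.take_succ_cons]
  congr 1
  rw [show j - (i + 1) = k from by omega]

theorem pv_slice_empty (arr : List String) (i j : Nat) (h : j ≤ i ∨ arr.length ≤ i) :
    PySem.List.slice arr (some (i : Int)) (some (j : Int)) = [] := by
  rw [PySem.List.slice_natCast]
  rcases h with h | h
  · rw [show j - i = 0 by omega]
    simp
  · rw [List.drop_eq_nil_of_le h]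
    simp

theorem pv_findSpace_stop (arr : List String) (i n : Nat) (h : ¬(i < n ∧ i < arr.length)) :
    pvFindSpace arr i n = none := by
  rw [pvFindSpace, dif_neg h]

theorem pv_loopB_shift (arr : List String) (n i : Nat) (out : List String)
    (hin : i < n) (hil : i < arr.length) (hns : arr[i]'hil ≠ " ") :
    pvLoopB arr n i out = pvLoopB arr n (i + 1) (out ++ [arr[i]'hil]) := by
  have hstep : pvFindSpace arr i n = pvFindSpace arr (i + 1) n := by
    rw [pvFindSpace, dif_pos ⟨hin, hil⟩, if_neg hns]
  conv_lhs => rw [pvLoopB, hstep]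
  conv_rhs => rw [pvLoopB]
  cases hf : pvFindSpace arr (i + 1) n with
  | some j =>
    obtain ⟨hij, _, _⟩ := pvFindSpace_some arr n (i + 1) j hf
    simp only
    rw [pv_slice_cons arr i j (by omega) hil]
    simp
  | none =>
    simp only
    by_cases hjl : i + 1 < arr.length ∧ i + 1 ≤ n
    · rw [pv_slice_cons arr i n hin hil]
      simp
    · rw [pv_slice_empty arr (i + 1) n (by omega),
          pv_slice_cons arr i n hin hil,
          pv_slice_empty arr (i + 1) n (by omega)]
      simp

theorem pv_loopB_eq (arr : List String) (n : Nat) :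
    ∀ (fuel i : Nat) (out : List String), n - i ≤ fuel →
      pvLoopB arr n i out = out ++ ((arr.drop i).take (n - i)).flatMap pvUrlF := by
  intro fuel
  induction fuel with
  | zero =>
    intro i out hf
    rw [pvLoopB, pv_findSpace_stop arr i n (by omega)]
    rw [pv_slice_empty arr i n (by omega), show n - i = 0 by omega]
    simp
  | succ fuel ih =>
    intro i out hf
    by_cases h : i < n ∧ i < arr.length
    · have hregion : (arr.drop i).take (n - i)
          = arr[i]'h.2 :: (arr.drop (i + 1)).take (n - (i + 1)) := by
        rw [List.drop_eq_getElem_cons h.2]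
        obtain ⟨k, hk⟩ : ∃ k, n - i = k + 1 := ⟨n - i - 1, by omega⟩
        rw [hk, List.take_succ_cons]
        congr 1
        rw [show n - (i + 1) = k from by omega]
      by_cases hsp : arr[i]'h.2 = " "
      · have hfind : pvFindSpace arr i n = some i := by
          rw [pvFindSpace, dif_pos h, if_pos hsp]
        rw [pvLoopB, hfind]
        simp only
        rw [pv_slice_empty arr i i (by omega), ih (i + 1) _ (by omega), hregion]
        simp [pvUrlF, hsp]
      · rw [pv_loopB_shift arr n i out h.1 h.2 hsp, ih (i + 1) _ (by omega), hregion]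
        simp [pvUrlF, hsp]
    · rw [pvLoopB, pv_findSpace_stop arr i n h]
      simp only
      rw [pv_slice_empty arr i n (by omega)]
      have : (arr.drop i).take (n - i) = [] := by
        rcases not_and_or.mp h with h1 | h1
        · rw [show n - i = 0 by omega]; simp
        · rw [List.drop_eq_nil_of_le (by omega)]; simp
      rw [this]
      simp

theorem pv_getD_append_len (pre : List String) (y : String) (ys : List String) (d : String) :
    (pre ++ y :: ys).getD pre.length d = y := by
  simp [List.getD_eq_getElem?_getD, List.getElem?_append_right (Nat.le_refl pre.length)]

theorem pv_set_append (pre suf : List String) (k : Nat) (v : String) :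
    (pre ++ suf).set (pre.length + k) v = pre ++ suf.set k v := by
  induction pre with
  | nil => simp
  | cons a pre ih => simp [List.set, Nat.succ_add, ih]

theorem pv_take_two_indep (u : List String) (x q0 : String) (t t' : List String) :
    (u ++ x :: q0 :: t).take 2 = (u ++ x :: q0 :: t').take 2 := by
  match u with
  | [] => simp
  | [a] => simp
  | a :: b :: u => simp

-- the shift loop moves the m-block two cells to the right (descending writes)
theorem pv_fold_shift (m : List String) : ∀ (P : List String) (q0 q1 : String) (rest : List String),
    (PySem.List.pyRange ((P.length : Int) + (m.length : Int) - 1) ((P.length : Int) - 1) (-1)).foldl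
      (fun a i => PySem.List.pySetD a (i + 2) (PySem.List.pyGetD a i "")) (P ++ m ++ q0 :: q1 :: rest)
    = P ++ (m ++ q0 :: q1 :: rest).take 2 ++ m ++ rest := by
  induction m using List.reverseRecOn with
  | nil =>
    intro P q0 q1 rest
    rw [show (P.length : Int) + (([] : List String).length : Int) - 1 = (P.length : Int) - 1 by simp,
        PySem.List.pyRange_neg_one_eq_nil (le_refl _)]
    simp
  | append_singleton m₀ x ih =>
    intro P q0 q1 rest
    rw [show (P.length : Int) + (((m₀ ++ [x]).length : Nat) : Int) - 1
          = (((P ++ m₀).length : Nat) : Int) by simp <;> omega,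
        PySem.List.pyRange_neg_one_cons (by simp <;> omega), List.foldl_cons]
    rw [show P ++ (m₀ ++ [x]) ++ q0 :: q1 :: rest = (P ++ m₀) ++ x :: q0 :: q1 :: rest by simp]
    have hget : PySem.List.pyGetD ((P ++ m₀) ++ x :: q0 :: q1 :: rest) (((P ++ m₀).length : Nat) : Int) ""
        = x := by
      rw [PySem.List.pyGetD_natCast]
      exact pv_getD_append_len _ _ _ _
    have hset : PySem.List.pySetD ((P ++ m₀) ++ x :: q0 :: q1 :: rest) ((((P ++ m₀).length : Nat) : Int) + 2) x
        = (P ++ m₀) ++ x :: q0 :: x :: rest := by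
      rw [show (((P ++ m₀).length : Nat) : Int) + 2 = (((P ++ m₀).length + 2 : Nat) : Int) by simp,
          PySem.List.pySetD_natCast]
      have := pv_set_append (P ++ m₀) (x :: q0 :: q1 :: rest) 2 x
      simpa using this
    rw [hget, hset]
    rw [show (P ++ m₀) ++ x :: q0 :: x :: rest = P ++ m₀ ++ x :: q0 :: (x :: rest) by simp,
        show (((P ++ m₀).length : Nat) : Int) - 1 = (P.length : Int) + (m₀.length : Int) - 1 by simp <;> omega,
        ih P x q0 (x :: rest)]
    rw [show (m₀ ++ x :: q0 :: (x :: rest)).take 2 = ((m₀ ++ [x]) ++ q0 :: q1 :: rest).take 2 by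
          simpa using pv_take_two_indep m₀ x q0 (x :: rest) (q1 :: rest)]
    simp

theorem pv_shift_eq (P mid post : List String) (h2 : 2 ≤ post.length) :
    pvShiftByTwo (P ++ "%" :: mid ++ post) ((P.length : Nat) : Int) ((mid.length : Nat) : Int)
      = (((P.length : Nat) : Int) + 3, P ++ "%" :: "2" :: "0" :: mid ++ post.drop 2) := by
  obtain ⟨q0, q1, rest, rfl⟩ : ∃ q0 q1 rest, post = q0 :: q1 :: rest := by
    match post, h2 with
    | q0 :: q1 :: rest, _ => exact ⟨q0, q1, rest, rfl⟩
  unfold pvShiftByTwo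
  rw [show P ++ "%" :: mid ++ q0 :: q1 :: rest = (P ++ ["%"]) ++ mid ++ q0 :: q1 :: rest by simp,
      show (P.length : Int) + (mid.length : Int) = ((P ++ ["%"]).length : Int) + (mid.length : Int) - 1 by
        simp; omega,
      show (P.length : Int) + 1 - 1 = ((P ++ ["%"]).length : Int) - 1 by simp,
      pv_fold_shift mid (P ++ ["%"]) q0 q1 rest]
  obtain ⟨a, b, hab⟩ : ∃ a b, (mid ++ q0 :: q1 :: rest).take 2 = [a, b] := by
    match mid with
    | [] => exact ⟨q0, q1, by simp⟩
    | [c] => exact ⟨c, q0, by simp⟩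
    | c :: d :: m => exact ⟨c, d, by simp⟩
  rw [hab]
  have hs1 : PySem.List.pySetD ((P ++ ["%"]) ++ [a, b] ++ mid ++ rest) (((P.length : Nat) : Int) + 1) "2"
      = (P ++ ["%"]) ++ "2" :: b :: (mid ++ rest) := by
    rw [show (((P.length : Nat)) : Int) + 1 = (((P ++ ["%"]).length : Nat) : Int) by simp,
        PySem.List.pySetD_natCast]
    have := pv_set_append (P ++ ["%"]) ([a, b] ++ mid ++ rest) 0 "2"
    simp only [Nat.add_zero] at this
    simpa [List.append_assoc] using this
  have hs2 : PySem.List.pySetD ((P ++ ["%"]) ++ "2" :: b :: (mid ++ rest)) ((((P.length : Nat)) : Int) + 1 + 1) "0"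
      = (P ++ ["%"]) ++ "2" :: "0" :: (mid ++ rest) := by
    rw [show (((P.length : Nat)) : Int) + 1 + 1 = (((P ++ ["%"]).length + 1 : Nat) : Int) by simp <;> omega,
        PySem.List.pySetD_natCast]
    have := pv_set_append (P ++ ["%"]) ("2" :: b :: (mid ++ rest)) 1 "0"
    simpa [List.set] using this
  simp only [List.append_assoc] at hs1 hs2 ⊢
  rw [hs1, hs2]
  simp

theorem pv_loop_eq (mid : List String) : ∀ (P post : List String),
    (mid.flatMap pvUrlF).length ≤ mid.length + post.length →
    pvLoopA (P ++ mid ++ post) ((mid.length : Nat) : Int) ((P.length : Nat) : Int)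
      = P ++ mid.flatMap pvUrlF ++ post.drop ((mid.flatMap pvUrlF).length - mid.length) := by
  induction mid with
  | nil =>
    intro P post _
    rw [pvLoopA]
    simp
  | cons c mid ih =>
    intro P post hlen
    rw [pvLoopA]
    have hpos : (0 : Int) < (((c :: mid).length : Nat) : Int) := by simp
    rw [dif_pos hpos]
    have hget : PySem.List.pyGetD (P ++ (c :: mid) ++ post) ((P.length : Nat) : Int) "" = c := by
      rw [PySem.List.pyGetD_natCast]
      have : P ++ (c :: mid) ++ post = P ++ c :: (mid ++ post) := by simp
      rw [this]
      exact pv_getD_append_len _ _ _ _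
    by_cases hc : c = " "
    · -- space branch
      rw [hget, if_neg (by simp [hc])]
      have hset : PySem.List.pySetD (P ++ (c :: mid) ++ post) ((P.length : Nat) : Int) "%"
          = P ++ "%" :: mid ++ post := by
        rw [PySem.List.pySetD_natCast]
        have : P ++ (c :: mid) ++ post = P ++ (c :: (mid ++ post)) := by simp
        rw [this]
        have := pv_set_append P (c :: (mid ++ post)) 0 "%"
        simpa [List.set] using this
      have hrem : (((c :: mid).length : Nat) : Int) - 1 = ((mid.length : Nat) : Int) := by
        push_cast; simp
      -- side arithmetic: post has at least 2 cells
      have hmono := pvUrlF_len mid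
      have hflat : ((c :: mid).flatMap pvUrlF) = ["%", "2", "0"] ++ mid.flatMap pvUrlF := by
        simp [pvUrlF, hc]
      have h2 : 2 ≤ post.length := by
        have hlen' := hlen
        rw [hflat] at hlen'
        simp only [List.length_append, List.length_cons] at hlen'
        omega
      rw [hset, hrem, pv_shift_eq P mid post h2]
      simp only []
      have harr : P ++ "%" :: "2" :: "0" :: mid ++ post.drop 2
          = (P ++ ["%", "2", "0"]) ++ mid ++ post.drop 2 := by simp
      have hcnt : ((P.length : Nat) : Int) + 3 = (((P ++ ["%", "2", "0"]).length : Nat) : Int) := by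
        simp <;> omega
      rw [harr, hcnt, ih (P ++ ["%", "2", "0"]) (post.drop 2)
        (by
          have hlen' := hlen
          rw [hflat] at hlen'
          simp only [List.length_append, List.length_cons, List.length_drop] at hlen' ⊢
          omega)]
      rw [hflat]
      have hdd : (post.drop 2).drop ((mid.flatMap pvUrlF).length - mid.length)
          = post.drop ((("%" :: "2" :: "0" :: mid.flatMap pvUrlF : List String)).length - (c :: mid).length) := by
        rw [List.drop_drop]
        have hm := pvUrlF_len mid
        congr 1
        simp only [List.length_cons]
        omega
      simp only [List.append_assoc] at hdd ⊢
      rw [hdd]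
      simp
    · -- non-space branch
      rw [hget, if_pos (by simp [hc])]
      have hrem : (((c :: mid).length : Nat) : Int) - 1 = ((mid.length : Nat) : Int) := by
        push_cast; simp
      have hcnt : ((P.length : Nat) : Int) + 1 = (((P ++ [c]).length : Nat) : Int) := by
        push_cast; simp
      have harr : P ++ (c :: mid) ++ post = (P ++ [c]) ++ mid ++ post := by simp
      have hflat : ((c :: mid).flatMap pvUrlF) = [c] ++ mid.flatMap pvUrlF := by
        simp [pvUrlF, hc]
      rw [hrem, hcnt, harr, ih (P ++ [c]) post (by
        have hlen' := hlen
        rw [hflat] at hlen'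
        simp only [List.length_append, List.length_cons] at hlen' ⊢
        omega)]
      rw [hflat]
      have hmono := pvUrlF_len mid
      have hdd : (mid.flatMap pvUrlF).length - mid.length
          = ([c] ++ mid.flatMap pvUrlF).length - (c :: mid).length := by simp
      rw [← hdd]
      simp

-- ===== VERDICT (by name: the statement is the Claim_ definition above) =====
theorem urlify_in_place_spec : Claim_equal_urlify_in_place := by
  intro arr true_len _ hpre
  unfold Spec_urlify_in_place urlify_in_place urlify_in_place_alt pvAltOut
  by_cases hpos : 0 < true_len
  · obtain ⟨hle, hbuf⟩ := hpre hpos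
    set t : Nat := true_len.toNat with ht
    have htl : true_len = (t : Int) := by omega
    have htlen : t ≤ arr.length := by omega
    have hsplit : arr = [] ++ arr.take t ++ arr.drop t := by simp
    have hmidlen : (arr.take t).length = t := by simp [htlen]
    have hcount : ((arr.take t).flatMap pvUrlF).length ≤ (arr.take t).length + (arr.drop t).length := by
      rw [pvUrlF_len_count]
      simp [htlen]
      omega
    have hA : pvLoopA arr true_len 0
        = [] ++ (arr.take t).flatMap pvUrlF
            ++ (arr.drop t).drop (((arr.take t).flatMap pvUrlF).length - (arr.take t).length) := by
      have := pv_loop_eq (arr.take t) [] (arr.drop t) hcount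
      rw [← hsplit] at this
      rw [htl]
      simpa [hmidlen] using this
    have hB : pvLoopB arr (if 0 < true_len then true_len.toNat else 0) 0 []
        = (arr.take t).flatMap pvUrlF := by
      rw [if_pos hpos, ← ht, pv_loopB_eq arr t t 0 [] (by omega)]
      simp
    rw [hA, hB]
    rw [PySem.List.slice_from_natCast]
    rw [List.drop_drop]
    simp only [List.nil_append]
    congr 1
    have hF := pvUrlF_len (arr.take t)
    congr 1
    omega
  · have hB : pvLoopB arr (if 0 < true_len then true_len.toNat else 0) 0 [] = [] := by
      rw [if_neg hpos, pv_loopB_eq arr 0 0 0 [] (by omega)]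
      simp
    rw [pvLoopA, dif_neg (by omega), hB]
    simp [PySem.List.slice_from_natCast]
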